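-- pv_equiv track=rewrite | github.com/momnpa333/baekjoon | gold/1300.py | makesub
-- ===== SOURCE A (Python) =====
-- def makesub(num,N):
--     subary=[]
--     if num<=N:
--         for i in range(1,num+1):
--             subary.append((num+1-i)*i)
--     else:
--         row=num-N
--         num=2*N-num
--         for i in range(1,num+1):
--             subary.append((row+i)*(N-i+1))
--     return subary
-- ===== SOURCE B (Python) =====
-- def makesub(num, N):
--     # Each branch of A lists the quadratic sequence r*(num+1-r) along the
--     # diagonal; consecutive terms differ by num-2r (second difference -2),
--     # so seed the first term and generate the rest by running differences,
--     # with no multiplication inside the loop.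
--     lo = max(1, num + 1 - N)
--     hi = min(num, N)
--     if hi < lo:
--         return []
--     val = lo * (num + 1 - lo)
--     delta = num - 2 * lo
--     out = [val]
--     for _ in range(hi - lo):
--         val += delta
--         delta -= 2
--         out.append(val)
--     return out
-- ===== Notes on version B (the rewrite author's own statement) =====
-- stated objective: alternative
-- what changed: Replaces A's two-branch per-index multiplication loops by a single finite-differences recurrence: seed val=lo*(num+1-lo) and delta=num-2*lo on the clamped range [max(1,num+1-N),min(num,N)], then generate each next term with val+=delta; delta-=2 (no multiplication in the loop).
import Mathlib
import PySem

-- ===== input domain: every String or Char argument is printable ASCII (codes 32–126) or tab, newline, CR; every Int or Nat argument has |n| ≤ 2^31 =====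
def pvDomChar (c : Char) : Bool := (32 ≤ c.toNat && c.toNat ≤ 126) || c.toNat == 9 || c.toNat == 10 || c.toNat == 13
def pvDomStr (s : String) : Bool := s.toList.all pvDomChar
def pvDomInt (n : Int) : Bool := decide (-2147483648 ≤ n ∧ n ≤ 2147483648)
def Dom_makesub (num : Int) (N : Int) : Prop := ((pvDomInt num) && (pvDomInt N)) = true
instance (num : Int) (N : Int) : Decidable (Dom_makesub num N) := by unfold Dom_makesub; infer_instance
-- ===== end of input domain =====

-- B replaces A's two per-index multiplication loops by one finite-differences
-- recurrence (val += delta; delta -= 2) over the clamped range; objective: alternative.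

-- ===== PORT A =====
def makesub (num : Int) (N : Int) : List Int :=
  if num ≤ N then
    (PySem.List.pyRange 1 (num + 1) 1).foldl (fun subary i => subary ++ [(num + 1 - i) * i]) []
  else
    let row := num - N
    let num2 := 2 * N - num   -- A reassigns `num`; named num2 here
    (PySem.List.pyRange 1 (num2 + 1) 1).foldl (fun subary i => subary ++ [(row + i) * (N - i + 1)]) []

-- ===== PORT B =====
-- the `for _ in range(hi-lo)` loop of Source B, recursion on the remaining count
def bLoop : Nat → Int → Int → List Int → List Int
  | 0, _, _, out => out
  | n + 1, val, delta, out => bLoop n (val + delta) (delta - 2) (out ++ [val + delta])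

def makesub_alt (num : Int) (N : Int) : List Int :=
  let lo := max 1 (num + 1 - N)
  let hi := min num N
  if hi < lo then []
  else
    let val := lo * (num + 1 - lo)
    let delta := num - 2 * lo
    bLoop (hi - lo).toNat val delta [val]

-- ===== PRECONDITION & SPEC =====
def Spec_makesub (num : Int) (N : Int) (out : List Int) : Prop := out = makesub_alt num N
instance (num : Int) (N : Int) (out : List Int) : Decidable (Spec_makesub num N out) := by unfold Spec_makesub; infer_instance

-- ===== CLAIM (what is proved, stated in full; the proofs are below) =====
def Claim_equal_makesub : Prop := ∀ (num : Int) (N : Int), Dom_makesub num N → Spec_makesub num N (makesub num N)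

-- ===== LEMMAS AND PROOFS =====

-- the difference loop, seeded with the value and first difference at index r,
-- produces the map of i*(num+1-i) over the next n indices
theorem bLoop_eq_map (num : Int) :
    ∀ (n : Nat) (r : Int) (out : List Int),
      bLoop n (r * (num + 1 - r)) (num - 2 * r) out
        = out ++ (PySem.List.pyRange (r + 1) (r + 1 + (n : Int)) 1).map (fun i => i * (num + 1 - i)) := by
  intro n
  induction n with
  | zero =>
    intro r out
    have h : PySem.List.pyRange (r + 1) (r + 1 + (0 : Int)) 1 = [] := by
      simp [PySem.List.pyRange]
    simp [bLoop, PySem.List.pyRange]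
  | succ n ih =>
    intro r out
    have hval : r * (num + 1 - r) + (num - 2 * r) = (r + 1) * (num + 1 - (r + 1)) := by ring
    have hd : num - 2 * r - 2 = num - 2 * (r + 1) := by ring
    rw [bLoop, hval, hd, ih (r + 1)]
    have hb : r + 1 + ((n + 1 : Nat) : Int) = r + 1 + 1 + (n : Int) := by push_cast; ring
    rw [hb, PySem.List.pyRange_one_cons (show r + 1 < r + 1 + 1 + (n : Int) by omega)]
    simp [List.append_assoc]

-- B equals the map of i*(num+1-i) over the clamped range
theorem alt_eq_map (num N : Int) :
    makesub_alt num N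
      = (PySem.List.pyRange (max 1 (num + 1 - N)) (min num N + 1) 1).map (fun i => i * (num + 1 - i)) := by
  unfold makesub_alt
  set lo := max 1 (num + 1 - N) with hlo
  set hi := min num N with hhi
  by_cases h : hi < lo
  · have hr : PySem.List.pyRange lo (hi + 1) 1 = [] := by
      simp [PySem.List.pyRange]; omega
    simp [h, hr]
  · simp only [if_neg h]
    have hb : lo + 1 + ((hi - lo).toNat : Int) = hi + 1 := by omega
    rw [bLoop_eq_map num (hi - lo).toNat lo, hb,
        PySem.List.pyRange_one_cons (show lo < hi + 1 by omega)]
    simp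

-- A equals the same map (reuses the index-shift argument)
theorem map_pyRange_shift (f g : Int → Int) (s : Int) :
    ∀ (n : Nat) (a b : Int), b - a = (n : Int) →
      (∀ i, a ≤ i → i < b → f i = g (i + s)) →
      (PySem.List.pyRange a b 1).map f = (PySem.List.pyRange (a + s) (b + s) 1).map g := by
  intro n
  induction n with
  | zero =>
    intro a b hab _
    have h1 : PySem.List.pyRange a b 1 = [] := by
      simp [PySem.List.pyRange]; omega
    have h2 : PySem.List.pyRange (a + s) (b + s) 1 = [] := by
      simp [PySem.List.pyRange]; omega
    simp [h1, h2]
  | succ n ih =>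
    intro a b hab hfg
    have hlt : a < b := by omega
    have hlt' : a + s < b + s := by omega
    rw [PySem.List.pyRange_one_cons hlt, PySem.List.pyRange_one_cons hlt']
    simp only [List.map_cons]
    rw [hfg a le_rfl hlt, ih (a + 1) b (by omega) (fun i h1 h2 => hfg i (by omega) h2)]
    rw [show a + 1 + s = a + s + 1 by ring]

theorem a_eq_map (num N : Int) :
    makesub num N
      = (PySem.List.pyRange (max 1 (num + 1 - N)) (min num N + 1) 1).map (fun i => i * (num + 1 - i)) := by
  unfold makesub
  simp only [PySem.List.foldl_append_singleton_eq_map]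
  by_cases h : num ≤ N
  · simp only [if_pos h]
    have hlo : max 1 (num + 1 - N) = 1 := by omega
    have hhi : min num N = num := by omega
    rw [hlo, hhi]
    by_cases hn : 0 ≤ num
    · have := map_pyRange_shift (fun i => (num + 1 - i) * i) (fun r => r * (num + 1 - r)) 0
        num.toNat 1 (num + 1) (by omega) (by intro i _ _; ring_nf)
      simpa using this
    · have h1 : PySem.List.pyRange 1 (num + 1) 1 = [] := by
        simp [PySem.List.pyRange]; omega
      rw [h1]; rfl
  · simp only [if_neg h]
    have hlo : max 1 (num + 1 - N) = num + 1 - N := by omega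
    have hhi : min num N = N := by omega
    rw [hlo, hhi]
    by_cases hc : 0 ≤ 2 * N - num
    · have := map_pyRange_shift (fun i => (num - N + i) * (N - i + 1))
        (fun r => r * (num + 1 - r)) (num - N)
        (2 * N - num).toNat 1 (2 * N - num + 1)
        (by omega) (by intro i _ _; ring_nf)
      rw [show (1 : Int) + (num - N) = num + 1 - N by ring,
          show (2 * N - num + 1) + (num - N) = N + 1 by ring] at this
      exact this
    · have h1 : PySem.List.pyRange 1 (2 * N - num + 1) 1 = [] := by
        simp [PySem.List.pyRange]; omega
      have h2 : PySem.List.pyRange (num + 1 - N) (N + 1) 1 = [] := by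
        simp [PySem.List.pyRange]; omega
      rw [h1, h2]; rfl

-- ===== VERDICT (by name: the statement is the Claim_ definition above) =====
theorem makesub_spec : Claim_equal_makesub := by
  intro num N _
  unfold Spec_makesub
  rw [a_eq_map, alt_eq_map]
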